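-- pv_equiv track=rewrite | github.com/harshjohar/unacademy_a | class/problem_solving/ps2.py | unique_dict
-- ===== SOURCE A (Python) =====
-- def unique_dict(string):
--     dict = {}
--     for i in range(len(string)):
--         if dict.get(string[i]) == None:
--             dict[string[i]] = 1
--         else:
--             dict[string[i]] += 1
--
--     result = []
--     for i in dict.keys():
--         if dict[i] == 1:
--             result.append(i)
--     return result
-- ===== SOURCE B (Python) =====
-- def unique_dict(string):
--     return [c for c in string if string.count(c) == 1]
-- ===== Notes on version B (the rewrite author's own statement) =====
-- stated objective: simpler
-- what changed: Replaces the two-pass frequency-dict build-then-filter with a single comprehension over the string that tests each character by string.count; a character with count 1 appears exactly once, so first-occurrence order is preserved.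
import Mathlib
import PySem

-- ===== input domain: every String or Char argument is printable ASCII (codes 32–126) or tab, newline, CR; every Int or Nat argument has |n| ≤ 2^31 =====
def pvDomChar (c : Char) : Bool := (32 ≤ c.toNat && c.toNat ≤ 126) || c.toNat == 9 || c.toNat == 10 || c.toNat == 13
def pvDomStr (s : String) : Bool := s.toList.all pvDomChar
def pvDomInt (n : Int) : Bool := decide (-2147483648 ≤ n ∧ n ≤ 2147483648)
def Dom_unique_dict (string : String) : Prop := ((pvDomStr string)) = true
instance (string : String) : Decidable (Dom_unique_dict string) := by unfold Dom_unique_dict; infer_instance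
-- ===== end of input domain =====

-- B replaces A's build-a-frequency-dict-then-filter with a single comprehension testing
-- string.count(c) == 1 per character (simpler, not faster).

-- ===== PORT A =====
-- second loop of A (iterate dict.keys, append keys whose count is 1) as a helper
def uniqueFromCounts (d : PySem.Dict Char Int) : List String :=
  d.keys.foldl
    (fun result k =>
      -- dict[i]: k comes from d.keys, so the key is present and getD's default is never used
      if d.getD k 0 == 1 then result ++ [String.singleton k] else result) []

def unique_dict (string : String) : List String :=
  uniqueFromCounts
    ((PySem.List.pyRange 0 (PySem.Str.len string)).foldl
      (fun d i =>
        -- string[i]: i is drawn from range(len(string)), so the index is always in range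
        -- and the default of pyGetD is never used
        if d.get? (PySem.List.pyGetD string.toList i ' ') = none then
          d.insert (PySem.List.pyGetD string.toList i ' ') 1
        else
          d.insert (PySem.List.pyGetD string.toList i ' ')
            (d.getD (PySem.List.pyGetD string.toList i ' ') 0 + 1))
      PySem.Dict.empty)

-- ===== PORT B =====
def unique_dict_alt (string : String) : List String :=
  (string.toList.filter
    (fun c => PySem.Str.count string (String.singleton c) == 1)).map String.singleton

-- ===== PRECONDITION & SPEC =====
def Spec_unique_dict (string : String) (out : List String) : Prop := out = unique_dict_alt string
instance (string : String) (out : List String) : Decidable (Spec_unique_dict string out) := by unfold Spec_unique_dict; infer_instance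

-- ===== CLAIM (what is proved, stated in full; the proofs are below) =====
def Claim_equal_unique_dict : Prop := ∀ (string : String), Dom_unique_dict string → Spec_unique_dict string (unique_dict string)

-- ===== LEMMAS AND PROOFS =====

-- Python s.count(c) for a single character c is the character count of c in s.
theorem chars_count_go_singleton (c : Char) :
    ∀ (fuel : Nat) (l : List Char) (acc : Nat), l.length ≤ fuel →
      PySem.Chars.count.go [c] fuel l acc = acc + l.count c := by
  intro fuel
  induction fuel with
  | zero =>
    intro l acc h
    have : l = [] := List.eq_nil_of_length_eq_zero (Nat.le_zero.mp h)
    subst this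
    simp [PySem.Chars.count.go]
  | succ n ih =>
    intro l acc h
    cases l with
    | nil => simp [PySem.Chars.count.go]
    | cons a t =>
      by_cases hac : a = c
      · subst hac
        have hpre : [a].isPrefixOf (a :: t) = true := by simp [List.isPrefixOf]
        simp only [PySem.Chars.count.go, hpre, if_pos]
        rw [show ([a].length) = 1 from rfl]
        simp only [List.drop_one, List.tail_cons]
        rw [ih t (acc + 1) (by simpa using Nat.le_of_succ_le_succ (by simpa using h))]
        simp
        omega
      · have hpre : [c].isPrefixOf (a :: t) = false := by
          simp [List.isPrefixOf, Ne.symm hac]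
        simp only [PySem.Chars.count.go, hpre]
        rw [ih t acc (by simpa using Nat.le_of_succ_le_succ (by simpa using h))]
        simp [List.count_cons]
        omega

theorem chars_count_singleton (cs : List Char) (c : Char) :
    PySem.Chars.count cs [c] = cs.count c := by
  simp only [PySem.Chars.count, List.isEmpty_cons, if_false, Bool.false_eq_true]
  simpa using chars_count_go_singleton c cs.length cs 0 (le_refl _)

-- Filtering first occurrences (Set.ofList) by a predicate that forces count ≤ 1
-- is the same as filtering the whole list.
theorem filter_ofList_of_count_le_one {p : Char → Bool} :
    ∀ (l : List Char), (∀ x ∈ l, p x = true → l.count x ≤ 1) →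
      (PySem.Set.ofList l).filter p = l.filter p := by
  intro l
  induction l with
  | nil => intro _; rfl
  | cons a t ih =>
    intro h
    rw [PySem.Set.ofList_cons]
    have ht : ∀ x ∈ t, p x = true → t.count x ≤ 1 := by
      intro x hx hp
      have h1 := h x (List.mem_cons_of_mem a hx) hp
      have hle : t.count x ≤ (a :: t).count x := by
        rw [List.count_cons]; split <;> omega
      omega
    by_cases hpa : p a = true
    · have hnot : a ∉ t := by
        intro hmem
        have h1 := h a (List.mem_cons_self) hpa
        have h2 : 1 ≤ t.count a := List.one_le_count_iff.mpr hmem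
        rw [List.count_cons] at h1
        simp at h1
        omega
      have hdis : (PySem.Set.ofList t).discard a = PySem.Set.ofList t := by
        unfold PySem.Set.discard
        apply List.filter_eq_self.mpr
        intro x hx
        have hxt : x ∈ t := (PySem.Set.mem_ofList t x).mp hx
        have hxa : x ≠ a := fun he => hnot (he ▸ hxt)
        simp [hxa]
      rw [hdis]
      simp only [List.filter_cons, hpa, if_pos]
      rw [ih ht]
    · have hpa' : p a = false := by simpa using hpa
      simp only [List.filter_cons, hpa', Bool.false_eq_true, if_neg, not_false_iff]
      unfold PySem.Set.discard
      rw [List.filter_filter]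
      have hfp : (fun x => p x && !x == a) = fun x => p x := by
        funext x
        by_cases hx : p x = true
        · have hxa : x ≠ a := fun he => by rw [he] at hx; rw [hx] at hpa'; cases hpa'
          simp [hx, hxa]
        · simp [Bool.eq_false_iff.mpr hx]
      rw [hfp, ih ht]

-- the two Bool tests coincide:  (↑(count) : Int) == 1  vs  count == 1
theorem intcast_count_beq (n : Nat) : ((n : Int) == (1 : Int)) = (n == 1) := by
  by_cases h : n = 1 <;> simp [h]

-- ===== VERDICT (by name: the statement is the Claim_ definition above) =====
theorem unique_dict_spec : Claim_equal_unique_dict := by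
  intro string _
  unfold Spec_unique_dict unique_dict unique_dict_alt uniqueFromCounts
  have hlen : PySem.Str.len string = PySem.List.len string.toList := by
    simp [PySem.Str.len_eq, PySem.List.len]
  rw [hlen]
  have hloop := PySem.List.foldl_pyRange_pyGetD string.toList ' '
    (fun (d : PySem.Dict Char Int) c =>
      if d.get? c = none then d.insert c 1 else d.insert c (d.getD c 0 + 1))
    PySem.Dict.empty (a := 0) (by norm_num)
  beta_reduce at hloop
  rw [hloop]
  simp only [Int.toNat_zero, List.drop_zero]
  have hstep : (fun (d : PySem.Dict Char Int) (c : Char) =>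
      if d.get? c = none then d.insert c 1 else d.insert c (d.getD c 0 + 1)) =
      (fun (d : PySem.Dict Char Int) (c : Char) => d.insert c (d.getD c 0 + 1)) := by
    funext d c
    by_cases h : d.get? c = none
    · have h0 : d.getD c 0 = 0 := by simp [PySem.Dict.getD, h]
      simp [h, h0]
    · simp [h]
  rw [hstep]
  simp only [PySem.Dict.foldl_insert_getD_add_one_eq_counter, PySem.Dict.keys_counter,
    PySem.Dict.getD_counter, intcast_count_beq]
  rw [PySem.List.foldl_append_if (fun k => string.toList.count k == 1) String.singleton
        (PySem.Set.ofList string.toList) []]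
  rw [filter_ofList_of_count_le_one (p := fun k => string.toList.count k == 1)
        string.toList (by intro x _ hp; simp only [beq_iff_eq] at hp; omega)]
  simp only [List.nil_append]
  have hb : (fun c => PySem.Str.count string (String.singleton c) == 1) =
      (fun c => string.toList.count c == 1) := by
    funext c
    rw [PySem.Str.count_eq]
    have hs : (String.singleton c).toList = [c] := by simp [String.singleton]
    rw [hs, chars_count_singleton]
  rw [hb]
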